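-- pv_equiv track=rewrite | github.com/wshw4ng/N41 | evaluation/eval_utils.py | find_max_score_count
-- ===== SOURCE A (Python) =====
-- def find_max_score_count(attack_label, sorted_id_list, rest_miss_cnt):
--     score = 0
--     miss_cnt = 0
--
--     max_score = -len(sorted_id_list)
--     max_idx = 0 # index of sorted_id_list
--     hit_cnt = 0
--     hit_cnt_max = 0
--     miss_cnt_max = 0
--
--     assert (rest_miss_cnt >= 0), "find_max_score(): rest_miss_count must be larger than 0!"
--
--     for i, eid in enumerate(sorted_id_list): # eid indicates entry id
--         if attack_label[eid] == 0:
--             miss_cnt += 1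
--             score -= 1
--         elif attack_label[eid] == 1:
--             score += 1
--             hit_cnt += 1
--         # skip the case (attack_label[idx] == 2) which means included by another group
--
--         if rest_miss_cnt <= miss_cnt:
--             return max_idx, max_score, hit_cnt_max, miss_cnt
--
--         if max_score < score:
--             max_score = score
--             max_idx = i
--             hit_cnt_max = hit_cnt
--             miss_cnt_max = miss_cnt
-- ===== SOURCE B (Python) =====
-- def find_max_score_count(attack_label, sorted_id_list, rest_miss_cnt):
--     assert (rest_miss_cnt >= 0), "find_max_score(): rest_miss_count must be larger than 0!"
--
--     # pass 1: cumulative running score / miss count / hit count after each position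
--     scores, misses, hits = [], [], []
--     s = m = h = 0
--     for eid in sorted_id_list:
--         v = attack_label.get(eid, 2)  # absent ids are treated as label 2 (skip)
--         s = s - 1 if v == 0 else (s + 1 if v == 1 else s)
--         m = m + 1 if v == 0 else m
--         h = h + 1 if v == 1 else h
--         scores.append(s)
--         misses.append(m)
--         hits.append(h)
--
--     # termination index: first position whose running miss count reaches rest_miss_cnt
--     t = next((j for j, mm in enumerate(misses) if mm >= rest_miss_cnt), None)
--     if t is None:
--         return None  # same fall-through as the original
--
--     # pass 2: argmax (strict-greater wins, so the earliest max) over positions before t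
--     best_score, best_idx, best_hit = -len(sorted_id_list), 0, 0
--     i = 0
--     for sc, hc in zip(scores[:t], hits[:t]):
--         if sc > best_score:
--             best_score, best_idx, best_hit = sc, i, hc
--         i += 1
--     return best_idx, best_score, best_hit, misses[t]
-- ===== Notes on version B (the rewrite author's own statement) =====
-- stated objective: alternative
-- what changed: Replaces A's single online loop carrying seven pieces of state by three separate passes: a prep pass building cumulative score/miss/hit arrays, a search for the first position whose running miss count reaches rest_miss_cnt, and an argmax scan over the prefix before it; B reads absent ids as label 2 (skip) instead of raising KeyError on keys A never reaches.
-- outside the precondition, e.g. on find_max_score_count({0: 1}, [0], 1): A returns None, B returns None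
import Mathlib
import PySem

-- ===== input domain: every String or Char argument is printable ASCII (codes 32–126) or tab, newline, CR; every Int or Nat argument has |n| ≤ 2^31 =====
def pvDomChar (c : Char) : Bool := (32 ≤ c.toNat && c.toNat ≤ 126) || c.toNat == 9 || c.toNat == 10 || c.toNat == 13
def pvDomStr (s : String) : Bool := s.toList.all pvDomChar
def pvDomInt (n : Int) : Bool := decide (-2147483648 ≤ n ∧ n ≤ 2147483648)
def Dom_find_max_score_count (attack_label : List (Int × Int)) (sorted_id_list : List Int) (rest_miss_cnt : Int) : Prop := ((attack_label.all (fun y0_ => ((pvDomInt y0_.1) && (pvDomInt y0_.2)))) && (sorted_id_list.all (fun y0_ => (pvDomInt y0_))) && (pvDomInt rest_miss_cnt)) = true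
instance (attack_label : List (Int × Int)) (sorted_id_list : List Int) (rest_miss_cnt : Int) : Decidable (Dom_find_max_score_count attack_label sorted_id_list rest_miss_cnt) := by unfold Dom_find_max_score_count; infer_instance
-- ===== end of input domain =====

-- B replaces A's single online loop (seven running variables, early return) by a prep pass building
-- cumulative score/miss/hit arrays, a findIdx for the termination position, and an argmax scan over
-- the prefix before it; same cost, different decomposition.


-- ===== PORT A =====
-- A's single loop: running score/miss/hit plus the best-so-far state; early return when the running
-- miss count reaches rest_miss_cnt.  Python's fall-through `return None` (loop exhausted) is outside
-- Pre_ and ported as the default (0, 0, 0, 0); a missing dict key (KeyError, outside Pre_) is read as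
-- 2 ("skip"), exact whenever the key is present.
def loopA (d : PySem.Dict Int Int) (rest : Int) :
    List Int → Int → Int → Int → Int → Int → Int → Int → Int → Int × Int × Int × Int
  | [], _, _, _, _, _, _, _, _ => (0, 0, 0, 0)
  | eid :: tl, i, score, miss, max_score, max_idx, hit, hit_max, miss_max =>
      let v := d.getD eid 2
      let score' := if v = 0 then score - 1 else if v = 1 then score + 1 else score
      let miss' := if v = 0 then miss + 1 else miss
      let hit' := if v = 1 then hit + 1 else hit
      if rest ≤ miss' then (max_idx, max_score, hit_max, miss')
      else if max_score < score' then loopA d rest tl (i + 1) score' miss' score' i hit' hit' miss'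
      else loopA d rest tl (i + 1) score' miss' max_score max_idx hit' hit_max miss_max

def find_max_score_count (attack_label : List (Int × Int)) (sorted_id_list : List Int) (rest_miss_cnt : Int) : Int × Int × Int × Int :=
  loopA (PySem.Dict.ofList attack_label) rest_miss_cnt sorted_id_list 0
    0 0 (-(sorted_id_list.length : Int)) 0 0 0 0

-- ===== PORT B =====
-- pass 1 of Source B: cumulative (scores, misses, hits) after each position
def prepB (d : PySem.Dict Int Int) : List Int → Int → Int → Int → List Int × List Int × List Int
  | [], _, _, _ => ([], [], [])
  | eid :: tl, s, m, h =>
      let v := d.getD eid 2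
      let s' := if v = 0 then s - 1 else if v = 1 then s + 1 else s
      let m' := if v = 0 then m + 1 else m
      let h' := if v = 1 then h + 1 else h
      let rest := prepB d tl s' m' h'
      (s' :: rest.1, m' :: rest.2.1, h' :: rest.2.2)

-- pass 2 of Source B: argmax (strict-greater wins) over zipped (score, hit) prefix, explicit index i
def argmaxB : List (Int × Int) → Int → Int → Int → Int → Int × Int × Int
  | [], _, bs, bi, bh => (bs, bi, bh)
  | (sc, hc) :: tl, i, bs, bi, bh =>
      if bs < sc then argmaxB tl (i + 1) sc i hc else argmaxB tl (i + 1) bs bi bh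

def find_max_score_count_alt (attack_label : List (Int × Int)) (sorted_id_list : List Int) (rest_miss_cnt : Int) : Int × Int × Int × Int :=
  let d := PySem.Dict.ofList attack_label
  let p := prepB d sorted_id_list 0 0 0
  match p.2.1.findIdx? (fun mm => rest_miss_cnt ≤ mm) with
  | none => (0, 0, 0, 0)  -- Source B's `return None` fall-through, outside Pre_
  | some t =>
      let r := argmaxB ((p.1.take t).zip (p.2.2.take t)) 0 (-(sorted_id_list.length : Int)) 0 0
      (r.2.1, r.1, r.2.2, p.2.1.getD t 0)

-- ===== PRECONDITION & SPEC =====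
-- Pre_ is exactly A's returning domain: it excludes rest_miss_cnt < 0 (the assert raises), inputs
-- where A's loop reads an id absent from attack_label before terminating (KeyError), and inputs
-- where the running miss count never reaches rest_miss_cnt, on which A falls through returning
-- None, not an int 4-tuple.  Equivalently: the termination must fire inside the longest prefix of
-- sorted_id_list whose ids are all present keys.
def Pre_find_max_score_count (attack_label : List (Int × Int)) (sorted_id_list : List Int) (rest_miss_cnt : Int) : Prop :=
  0 ≤ rest_miss_cnt ∧
  (sorted_id_list.takeWhile (fun e => ((PySem.Dict.ofList attack_label).get? e).isSome)) ≠ [] ∧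
  rest_miss_cnt ≤ (((sorted_id_list.takeWhile (fun e => ((PySem.Dict.ofList attack_label).get? e).isSome)).filter
      (fun e => (PySem.Dict.ofList attack_label).getD e 2 == 0)).length : Int)

instance (attack_label : List (Int × Int)) (sorted_id_list : List Int) (rest_miss_cnt : Int) : Decidable (Pre_find_max_score_count attack_label sorted_id_list rest_miss_cnt) := by unfold Pre_find_max_score_count; infer_instance

def pvWitness_find_max_score_count : (List (Int × Int)) × List Int × Int :=
  ([(0, 1), (1, 0), (2, 2)], [0, 2, 1, 0], 1)

def Spec_find_max_score_count (attack_label : List (Int × Int)) (sorted_id_list : List Int) (rest_miss_cnt : Int) (out : Int × Int × Int × Int) : Prop := out = find_max_score_count_alt attack_label sorted_id_list rest_miss_cnt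
instance (attack_label : List (Int × Int)) (sorted_id_list : List Int) (rest_miss_cnt : Int) (out : Int × Int × Int × Int) : Decidable (Spec_find_max_score_count attack_label sorted_id_list rest_miss_cnt out) := by unfold Spec_find_max_score_count; infer_instance

-- ===== CLAIM (what is proved, stated in full; the proofs are below) =====
def Claim_equal_find_max_score_count : Prop := ∀ (attack_label : List (Int × Int)) (sorted_id_list : List Int) (rest_miss_cnt : Int), Dom_find_max_score_count attack_label sorted_id_list rest_miss_cnt → Pre_find_max_score_count attack_label sorted_id_list rest_miss_cnt → Spec_find_max_score_count attack_label sorted_id_list rest_miss_cnt (find_max_score_count attack_label sorted_id_list rest_miss_cnt)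

-- ===== LEMMAS AND PROOFS =====

-- B's three passes, restarted from an arbitrary midway state; loopA equals this for EVERY state,
-- by induction on the remaining ids (both sides fall through to (0,0,0,0) when findIdx? misses).
theorem loopA_eq_passes (d : PySem.Dict Int Int) (rest : Int) :
    ∀ (ids : List Int) (i s m ms mi h hm mm : Int),
      loopA d rest ids i s m ms mi h hm mm =
        (let p := prepB d ids s m h
         match p.2.1.findIdx? (fun x => rest ≤ x) with
         | none => (0, 0, 0, 0)
         | some t =>
             let r := argmaxB ((p.1.take t).zip (p.2.2.take t)) i ms mi hm
             (r.2.1, r.1, r.2.2, p.2.1.getD t 0)) := by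
  intro ids
  induction ids with
  | nil => intro i s m ms mi h hm mm; simp [loopA, prepB]
  | cons eid tl ih =>
      intro i s m ms mi h hm mm
      simp only [loopA, prepB]
      set v := d.getD eid 2 with hv
      set s' := if v = 0 then s - 1 else if v = 1 then s + 1 else s with hs'
      set m' := if v = 0 then m + 1 else m with hm'
      set h' := if v = 1 then h + 1 else h with hh'
      by_cases hterm : rest ≤ m'
      · simp [List.findIdx?_cons, hterm, argmaxB]
      · rw [if_neg hterm]
        by_cases hmax : ms < s'
        · rw [if_pos hmax, ih]
          simp only [List.findIdx?_cons, decide_eq_true_eq]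
          rw [if_neg hterm]
          cases hfi : (prepB d tl s' m' h').2.1.findIdx? (fun x => rest ≤ x) with
          | none => simp
          | some t => simp [List.take_succ_cons, List.zip_cons_cons, argmaxB, hmax]
        · rw [if_neg hmax, ih]
          simp only [List.findIdx?_cons, decide_eq_true_eq]
          rw [if_neg hterm]
          cases hfi : (prepB d tl s' m' h').2.1.findIdx? (fun x => rest ≤ x) with
          | none => simp
          | some t => simp [List.take_succ_cons, List.zip_cons_cons, argmaxB, hmax]

-- ===== VERDICT (by name: the statement is the Claim_ definition above) =====
theorem find_max_score_count_spec : Claim_equal_find_max_score_count := by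
  intro attack_label sorted_id_list rest_miss_cnt _hdom _hpre
  unfold Spec_find_max_score_count find_max_score_count find_max_score_count_alt
  exact loopA_eq_passes _ _ _ _ _ _ _ _ _ _ _
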